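-- pv_equiv track=rewrite | github.com/zhangbaomu/consensus | train/scripts/export_homopolymer_stats.py | _homopolymer_bounds
-- ===== SOURCE A (Python) =====
-- from typing import Any, Dict, List, Optional, Tuple
--
-- def _homopolymer_bounds(mask: List[bool]) -> Optional[Tuple[int, int]]:
--     try:
--         start = mask.index(True)
--     except ValueError:
--         return None
--
--     end = len(mask)
--     while end > start and not mask[end - 1]:
--         end -= 1
--     return start, end
-- ===== SOURCE B (Python) =====
-- from typing import List, Optional, Tuple
--
-- def _homopolymer_bounds(mask: List[bool]) -> Optional[Tuple[int, int]]:
--     first = None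
--     last = None
--     for i, flag in enumerate(mask):
--         if flag:
--             if first is None:
--                 first = i
--             last = i
--     if first is None:
--         return None
--     return first, last + 1
-- ===== Notes on version B (the rewrite author's own statement) =====
-- stated objective: alternative
-- what changed: Replaces A's mask.index(True) plus a separate backward while-scan from the end with one forward enumerate pass maintaining first/last accumulators.
import Mathlib
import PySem

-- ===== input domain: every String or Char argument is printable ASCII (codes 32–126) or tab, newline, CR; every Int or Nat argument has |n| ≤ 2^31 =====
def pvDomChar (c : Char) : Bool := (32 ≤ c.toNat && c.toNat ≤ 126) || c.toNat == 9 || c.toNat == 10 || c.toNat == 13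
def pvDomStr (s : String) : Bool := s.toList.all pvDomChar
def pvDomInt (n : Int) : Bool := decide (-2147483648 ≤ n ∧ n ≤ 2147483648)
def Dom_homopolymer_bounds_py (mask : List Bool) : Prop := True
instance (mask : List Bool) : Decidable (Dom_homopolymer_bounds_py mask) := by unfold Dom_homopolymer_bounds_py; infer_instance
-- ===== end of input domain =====

-- B replaces A's forward index(True) plus backward while-scan with a single forward
-- enumerate pass keeping first/last accumulators (objective: alternative decomposition).

-- ===== PORT A =====
-- Python's `while end > start and not mask[end - 1]: end -= 1`; end decreases by 1
-- each iteration, so it is the structural recursion below. mask[end-1] is only read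
-- with 0 ≤ end-1 < len(mask) in A's reachable states, where getD is exact.
def pvALoop (mask : List Bool) (start : Nat) : Nat → Nat
  | 0 => 0
  | e + 1 => if start < e + 1 && !(mask.getD e false) then pvALoop mask start e else e + 1

def homopolymer_bounds_py (mask : List Bool) : Option (Int × Int) :=
  match PySem.List.index? mask true with
  | none => none                                   -- except ValueError: return None
  | some s => some ((s : Int), (pvALoop mask s mask.length : Int))

-- ===== PORT B =====
-- loop body: if flag: (if first is None: first = i); last = i
def pvBStep (acc : Option Int × Option Int) (p : Int × Bool) : Option Int × Option Int :=
  if p.2 then ((match acc.1 with | none => some p.1 | some f => some f), some p.1) else acc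

def homopolymer_bounds_py_alt (mask : List Bool) : Option (Int × Int) :=
  let fl := (PySem.List.enumerate mask).foldl pvBStep (none, none)
  match fl with
  | (some f, some l) => some (f, l + 1)
  | _ => none

-- ===== PRECONDITION & SPEC =====
def Spec_homopolymer_bounds_py (mask : List Bool) (out : Option (Int × Int)) : Prop := out = homopolymer_bounds_py_alt mask
instance (mask : List Bool) (out : Option (Int × Int)) : Decidable (Spec_homopolymer_bounds_py mask out) := by unfold Spec_homopolymer_bounds_py; infer_instance

-- ===== CLAIM (what is proved, stated in full; the proofs are below) =====
def Claim_equal_homopolymer_bounds_py : Prop := ∀ (mask : List Bool), Dom_homopolymer_bounds_py mask → Spec_homopolymer_bounds_py mask (homopolymer_bounds_py mask)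

-- ===== LEMMAS AND PROOFS =====

-- proof-only reference functions: first / last true index (relative encodings)
def pvFirstT (k : Int) : List Bool → Option Int
  | [] => none
  | b :: xs => if b then some k else pvFirstT (k + 1) xs

def pvLastT : List Bool → Option Nat
  | [] => none
  | b :: xs =>
    match pvLastT xs with
    | some j => some (j + 1)
    | none => if b then some 0 else none

def pvLastTI (k : Int) : List Bool → Option Int
  | [] => none
  | b :: xs =>
    match pvLastTI (k + 1) xs with
    | some j => some j
    | none => if b then some k else none

lemma pvFold_eq (xs : List Bool) : ∀ (k : Int) (f0 l0 : Option Int),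
    (PySem.List.enumerate xs k).foldl pvBStep (f0, l0) =
      ((match f0 with | some f => some f | none => pvFirstT k xs),
       (match pvLastTI k xs with | some j => some j | none => l0)) := by
  induction xs with
  | nil => intro k f0 l0; cases f0 <;> simp [PySem.List.enumerate_nil, pvFirstT, pvLastTI]
  | cons b xs ih =>
    intro k f0 l0
    rw [PySem.List.enumerate_cons]
    simp only [List.foldl_cons]
    cases b with
    | false =>
      rw [show pvBStep (f0, l0) (k, false) = (f0, l0) by simp [pvBStep]]
      rw [ih (k + 1) f0 l0]
      simp only [pvFirstT, pvLastTI, if_neg Bool.false_ne_true]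
      cases pvLastTI (k + 1) xs <;> simp
    | true =>
      rw [show pvBStep (f0, l0) (k, true) =
            ((match f0 with | none => some k | some f => some f), some k) by simp [pvBStep]]
      rw [ih (k + 1) _ (some k)]
      simp only [pvFirstT, pvLastTI]
      cases f0 <;> cases pvLastTI (k + 1) xs <;> simp

lemma pvFirstT_eq_index? (xs : List Bool) : ∀ k : Int,
    pvFirstT k xs = (PySem.List.index? xs true).map (fun n => k + (n : Int)) := by
  induction xs with
  | nil => intro k; simp [pvFirstT, PySem.List.index?_eq_idxOf?]
  | cons b xs ih =>
    intro k
    simp only [PySem.List.index?_eq_idxOf?] at *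
    cases b with
    | true => simp [pvFirstT, List.idxOf?, List.findIdx?_cons]
    | false =>
      simp only [pvFirstT, if_neg Bool.false_ne_true, ih (k + 1),
        List.idxOf?, List.findIdx?_cons]
      cases List.findIdx? (· == true) xs with
      | none => simp
      | some n => simp; ring

lemma pvLastTI_eq (xs : List Bool) : ∀ k : Int,
    pvLastTI k xs = (pvLastT xs).map (fun n => k + (n : Int)) := by
  induction xs with
  | nil => intro k; simp [pvLastTI, pvLastT]
  | cons b xs ih =>
    intro k
    simp only [pvLastTI, pvLastT, ih (k + 1)]
    cases pvLastT xs with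
    | some j => simp; ring
    | none => cases b <;> simp

lemma pvLastT_append_singleton (xs : List Bool) (b : Bool) :
    pvLastT (xs ++ [b]) = if b then some xs.length else pvLastT xs := by
  induction xs with
  | nil => cases b <;> simp [pvLastT]
  | cons a xs ih =>
    simp only [List.cons_append, pvLastT, ih]
    cases b with
    | true => simp
    | false => cases pvLastT xs <;> simp

lemma pvLastT_take_succ (mask : List Bool) (e : Nat) (he : e < mask.length) :
    pvLastT (mask.take (e + 1)) =
      if mask.getD e false then some e else pvLastT (mask.take e) := by
  rw [List.take_add_one, List.getElem?_eq_getElem he]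
  simp only [Option.toList_some]
  rw [pvLastT_append_singleton, List.length_take, List.getD_eq_getElem _ _ he]
  simp [Nat.min_eq_left (Nat.le_of_lt he)]

lemma pvALoop_eq (mask : List Bool) : ∀ (e s : Nat), s < e → e ≤ mask.length →
    mask.getD s false = true →
    ∃ L, pvLastT (mask.take e) = some L ∧ pvALoop mask s e = L + 1 := by
  intro e
  induction e with
  | zero => intro s h; omega
  | succ e ih =>
    intro s hs he hmask
    have helt : e < mask.length := he
    by_cases hb : mask.getD e false = true
    · refine ⟨e, ?_, ?_⟩
      · rw [pvLastT_take_succ mask e helt, if_pos hb]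
      · simp only [pvALoop]
        rw [if_neg (by simp [List.getD] at hb ⊢; simp [hb])]
    · have hsne : s ≠ e := fun h => hb (h ▸ hmask)
      have hse : s < e := by omega
      obtain ⟨L, hL, hLoop⟩ := ih s hse (Nat.le_of_lt helt) hmask
      refine ⟨L, ?_, ?_⟩
      · rw [pvLastT_take_succ mask e helt, if_neg (by simpa using hb), hL]
      · rw [show pvALoop mask s (e + 1) = pvALoop mask s e by
          simp [pvALoop, hs, by simpa using hb]]
        exact hLoop

lemma pvAlt_eq (mask : List Bool) :
    homopolymer_bounds_py_alt mask =
      match PySem.List.index? mask true, pvLastT mask with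
      | some s, some L => some ((s : Int), (L : Int) + 1)
      | _, _ => none := by
  unfold homopolymer_bounds_py_alt
  rw [pvFold_eq mask 0 none none, pvFirstT_eq_index? mask 0, pvLastTI_eq mask 0]
  cases PySem.List.index? mask true <;> cases pvLastT mask <;> simp

-- ===== VERDICT (by name: the statement is the Claim_ definition above) =====
theorem homopolymer_bounds_py_spec : Claim_equal_homopolymer_bounds_py := by
  intro mask _
  unfold Spec_homopolymer_bounds_py
  rw [pvAlt_eq]
  unfold homopolymer_bounds_py
  cases hidx : PySem.List.index? mask true with
  | none => simp
  | some s =>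
    obtain ⟨hs, hsel, -⟩ := PySem.List.getElem_of_index?_eq_some hidx
    have hd : mask.getD s false = true := by rw [List.getD_eq_getElem _ _ hs]; exact hsel
    obtain ⟨L, hL, hLoop⟩ := pvALoop_eq mask mask.length s hs (le_refl _) hd
    rw [List.take_length] at hL
    simp only [hL, hLoop]
    push_cast
    ring_nf
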